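-- pv_equiv track=rewrite | github.com/EMC-Underground/dashupdater | methods.py | trimArrayCounts
-- ===== SOURCE A (Python) =====
-- def trimArrayCounts(counts):
--   array_counts = counts
--   counts = {"VNX": 0, "Symmetrix": 0, "XtremIO": 0, "Clariion": 0, "Isilon": 0, "Connectrix": 0, "Recoverpoint": 0,
--             "Data Domain": 0, "Avamar": 0, "VPLEX": 0, "ScaleIO": 0, "ECS/ViPR": 0, "Other": 0
--   }
--   for array in array_counts:
--     if "VNX" in array[0]:
--       counts['VNX'] += array[1]
--     elif "SYMMETRIX" in array[0]:
--       counts['Symmetrix'] += array[1]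
--     elif "DATADOMAIN" in array[0]:
--       counts['Data Domain'] += array[1]
--     elif "ISILON" in array[0]:
--       counts['Isilon'] += array[1]
--     elif "XTREMIO" in array[0]:
--       counts['XtremIO'] += array[1]
--     elif "CONNECTRIX" in array[0]:
--       counts['Connectrix'] += array[1]
--     elif "RECOVERPOINT" in array[0]:
--       counts['Recoverpoint'] += array[1]
--     elif "AVAMAR" in array[0]:
--       counts['Avamar'] += array[1]
--     elif "VPLEX" in array[0]:
--       counts['VPLEX'] += array[1]
--     elif "CLARIION" in array[0]:
--       counts['Clariion'] += array[1]
--     elif "CELERRA" in array[0]: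
--       counts['Clariion'] += array[1]
--     elif "VIPR" in array[0]:
--       counts['ECS/ViPR'] += array[1]
--     elif "SCALEIO" in array[0]:
--       counts['ScaleIO'] += array[1]
--     elif "ECS" in array[0]:
--       counts['ECS/ViPR'] += array[1]
--     else:
--       counts['Other'] += array[1]
--   return counts
-- ===== SOURCE B (Python) =====
-- _TABLE = [
--     ("VNX", "VNX"), ("SYMMETRIX", "Symmetrix"), ("DATADOMAIN", "Data Domain"),
--     ("ISILON", "Isilon"), ("XTREMIO", "XtremIO"), ("CONNECTRIX", "Connectrix"),
--     ("RECOVERPOINT", "Recoverpoint"), ("AVAMAR", "Avamar"), ("VPLEX", "VPLEX"),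
--     ("CLARIION", "Clariion"), ("CELERRA", "Clariion"), ("VIPR", "ECS/ViPR"),
--     ("SCALEIO", "ScaleIO"), ("ECS", "ECS/ViPR"),
-- ]
--
-- _ORDER = ["VNX", "Symmetrix", "XtremIO", "Clariion", "Isilon", "Connectrix",
--           "Recoverpoint", "Data Domain", "Avamar", "VPLEX", "ScaleIO",
--           "ECS/ViPR", "Other"]
--
-- def _category(name):
--     matches = [cat for pat, cat in _TABLE if pat in name]
--     return matches[0] if matches else "Other"
--
-- def trimArrayCounts(counts):
--     # stage 1: tag every entry with its category; stage 2: one filtered sum per category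
--     tagged = [(_category(name), n) for name, n in counts]
--     return {c: sum(n for cc, n in tagged if cc == c) for c in _ORDER}
-- ===== Notes on version B (the rewrite author's own statement) =====
-- stated objective: alternative
-- what changed: A makes one pass mutating a pre-initialised 13-key dict through a 14-branch elif chain; B is staged: it first tags every entry with its category (head of the matching-pattern comprehension over a rule table), then builds the result as one filtered sum per category in the fixed key order, with no mutable accumulator.
import Mathlib
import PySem

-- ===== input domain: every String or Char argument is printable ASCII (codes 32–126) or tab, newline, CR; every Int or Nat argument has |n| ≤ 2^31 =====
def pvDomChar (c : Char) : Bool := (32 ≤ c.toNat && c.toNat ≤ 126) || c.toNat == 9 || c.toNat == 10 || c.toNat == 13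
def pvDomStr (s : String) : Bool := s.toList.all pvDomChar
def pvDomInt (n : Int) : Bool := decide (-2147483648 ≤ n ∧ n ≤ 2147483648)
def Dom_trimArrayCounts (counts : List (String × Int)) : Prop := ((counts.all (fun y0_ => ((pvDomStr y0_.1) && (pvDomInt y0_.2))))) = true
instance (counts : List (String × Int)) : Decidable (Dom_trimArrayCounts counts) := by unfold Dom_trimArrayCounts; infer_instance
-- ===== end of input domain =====

-- B replaces A's single pass with a mutable 13-key dict and a 14-branch elif chain by a
-- staged computation: tag every entry with its category (first-match over a pattern
-- table), then produce one filtered sum per category (objective: alternative).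

-- ===== PORT A =====
-- literal port of A: the pre-initialised dict, then the elif chain per element
def trimArrayCounts (counts : List (String × Int)) : List (String × Int) :=
  let d0 : PySem.Dict String Int := PySem.Dict.ofList
    [("VNX", 0), ("Symmetrix", 0), ("XtremIO", 0), ("Clariion", 0), ("Isilon", 0),
     ("Connectrix", 0), ("Recoverpoint", 0), ("Data Domain", 0), ("Avamar", 0),
     ("VPLEX", 0), ("ScaleIO", 0), ("ECS/ViPR", 0), ("Other", 0)]
  (counts.foldl (fun d array =>
    if PySem.Str.isIn "VNX" array.1 then d.modify "VNX" 0 (· + array.2)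
    else if PySem.Str.isIn "SYMMETRIX" array.1 then d.modify "Symmetrix" 0 (· + array.2)
    else if PySem.Str.isIn "DATADOMAIN" array.1 then d.modify "Data Domain" 0 (· + array.2)
    else if PySem.Str.isIn "ISILON" array.1 then d.modify "Isilon" 0 (· + array.2)
    else if PySem.Str.isIn "XTREMIO" array.1 then d.modify "XtremIO" 0 (· + array.2)
    else if PySem.Str.isIn "CONNECTRIX" array.1 then d.modify "Connectrix" 0 (· + array.2)
    else if PySem.Str.isIn "RECOVERPOINT" array.1 then d.modify "Recoverpoint" 0 (· + array.2)
    else if PySem.Str.isIn "AVAMAR" array.1 then d.modify "Avamar" 0 (· + array.2)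
    else if PySem.Str.isIn "VPLEX" array.1 then d.modify "VPLEX" 0 (· + array.2)
    else if PySem.Str.isIn "CLARIION" array.1 then d.modify "Clariion" 0 (· + array.2)
    else if PySem.Str.isIn "CELERRA" array.1 then d.modify "Clariion" 0 (· + array.2)
    else if PySem.Str.isIn "VIPR" array.1 then d.modify "ECS/ViPR" 0 (· + array.2)
    else if PySem.Str.isIn "SCALEIO" array.1 then d.modify "ScaleIO" 0 (· + array.2)
    else if PySem.Str.isIn "ECS" array.1 then d.modify "ECS/ViPR" 0 (· + array.2)
    else d.modify "Other" 0 (· + array.2)) d0).items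

-- ===== PORT B =====
-- B's pattern table: (substring, category) in A's priority order
def pvTable : List (String × String) :=
  [("VNX", "VNX"), ("SYMMETRIX", "Symmetrix"), ("DATADOMAIN", "Data Domain"),
   ("ISILON", "Isilon"), ("XTREMIO", "XtremIO"), ("CONNECTRIX", "Connectrix"),
   ("RECOVERPOINT", "Recoverpoint"), ("AVAMAR", "Avamar"), ("VPLEX", "VPLEX"),
   ("CLARIION", "Clariion"), ("CELERRA", "Clariion"), ("VIPR", "ECS/ViPR"),
   ("SCALEIO", "ScaleIO"), ("ECS", "ECS/ViPR")]

-- the fixed key order of the result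
def pvOrder : List String :=
  ["VNX", "Symmetrix", "XtremIO", "Clariion", "Isilon", "Connectrix", "Recoverpoint",
   "Data Domain", "Avamar", "VPLEX", "ScaleIO", "ECS/ViPR", "Other"]

-- port of Source B's _category: the matching categories as a comprehension, then head-or-default
def pvCategory (name : String) : String :=
  match ((pvTable.filter (fun pc => PySem.Str.isIn pc.1 name)).map (·.2)) with
  | [] => "Other"
  | c :: _ => c

def trimArrayCounts_alt (counts : List (String × Int)) : List (String × Int) :=
  let tagged := counts.map (fun a => (pvCategory a.1, a.2))
  pvOrder.map (fun c => (c, tagged.foldl (fun s p => if p.1 == c then s + p.2 else s) 0))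

-- ===== PRECONDITION & SPEC =====
def Spec_trimArrayCounts (counts : List (String × Int)) (out : List (String × Int)) : Prop := out = trimArrayCounts_alt counts
instance (counts : List (String × Int)) (out : List (String × Int)) : Decidable (Spec_trimArrayCounts counts out) := by unfold Spec_trimArrayCounts; infer_instance

-- ===== CLAIM (what is proved, stated in full; the proofs are below) =====
def Claim_equal_trimArrayCounts : Prop := ∀ (counts : List (String × Int)), Dom_trimArrayCounts counts → Spec_trimArrayCounts counts (trimArrayCounts counts)

-- ===== LEMMAS AND PROOFS =====

-- proof-side view of pvCategory as a first-match scan of the table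
def pvScan (table : List (String × String)) (name : String) : String :=
  match table with
  | [] => "Other"
  | (pat, cat) :: rest => if PySem.Str.isIn pat name then cat else pvScan rest name

theorem pvCategory_eq_scan_go (name : String) : ∀ (t : List (String × String)),
    (match ((t.filter (fun pc => PySem.Str.isIn pc.1 name)).map (·.2)) with
     | [] => "Other"
     | c :: _ => c) = pvScan t name := by
  intro t
  induction t with
  | nil => rfl
  | cons hd tl ih =>
    obtain ⟨pat, cat⟩ := hd
    simp only [pvScan, List.filter_cons, PySem.Str.isIn] at ih ⊢
    by_cases h : PySem.Chars.isIn pat.toList name.toList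
    · simp [h]
    · simp [h, ih]

theorem pvCategory_eq_scan (name : String) : pvCategory name = pvScan pvTable name := by
  unfold pvCategory; exact pvCategory_eq_scan_go name pvTable

-- A's elif chain per element IS a single modify at the scanned category
set_option maxHeartbeats 1000000 in
theorem pvStep_eq (d : PySem.Dict String Int) (a : String × Int) :
    (if PySem.Str.isIn "VNX" a.1 then d.modify "VNX" 0 (· + a.2)
    else if PySem.Str.isIn "SYMMETRIX" a.1 then d.modify "Symmetrix" 0 (· + a.2)
    else if PySem.Str.isIn "DATADOMAIN" a.1 then d.modify "Data Domain" 0 (· + a.2)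
    else if PySem.Str.isIn "ISILON" a.1 then d.modify "Isilon" 0 (· + a.2)
    else if PySem.Str.isIn "XTREMIO" a.1 then d.modify "XtremIO" 0 (· + a.2)
    else if PySem.Str.isIn "CONNECTRIX" a.1 then d.modify "Connectrix" 0 (· + a.2)
    else if PySem.Str.isIn "RECOVERPOINT" a.1 then d.modify "Recoverpoint" 0 (· + a.2)
    else if PySem.Str.isIn "AVAMAR" a.1 then d.modify "Avamar" 0 (· + a.2)
    else if PySem.Str.isIn "VPLEX" a.1 then d.modify "VPLEX" 0 (· + a.2)
    else if PySem.Str.isIn "CLARIION" a.1 then d.modify "Clariion" 0 (· + a.2)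
    else if PySem.Str.isIn "CELERRA" a.1 then d.modify "Clariion" 0 (· + a.2)
    else if PySem.Str.isIn "VIPR" a.1 then d.modify "ECS/ViPR" 0 (· + a.2)
    else if PySem.Str.isIn "SCALEIO" a.1 then d.modify "ScaleIO" 0 (· + a.2)
    else if PySem.Str.isIn "ECS" a.1 then d.modify "ECS/ViPR" 0 (· + a.2)
    else d.modify "Other" 0 (· + a.2))
    = d.modify (pvCategory a.1) 0 (· + a.2) := by
  rw [pvCategory_eq_scan]
  simp only [pvTable, pvScan,
    apply_ite (fun k => PySem.Dict.modify d k 0 (· + a.2))]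

-- the scan returns "Other" or a category of the table
theorem pvScan_mem (name : String) : ∀ (t : List (String × String)),
    pvScan t name ∈ "Other" :: t.map (·.2) := by
  intro t
  induction t with
  | nil => simp [pvScan]
  | cons hd tl ih =>
    obtain ⟨pat, cat⟩ := hd
    simp only [pvScan]
    split
    · simp
    · rcases List.mem_cons.mp ih with h | h
      · simp [h]
      · simp [List.mem_cons.mpr (Or.inr (List.mem_cons_of_mem _ h))]

-- hence it always lands in pvOrder
theorem pvCategory_mem_order (name : String) : pvCategory name ∈ pvOrder := by
  rw [pvCategory_eq_scan]
  have hsub : ∀ x ∈ ("Other" :: pvTable.map (·.2)), x ∈ pvOrder := by decide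
  exact hsub _ (pvScan_mem name pvTable)

-- value at key c after A's fold = B's filtered running sum
theorem pvGetD_fold (c : String) : ∀ (l : List (String × Int)) (d : PySem.Dict String Int),
    (l.foldl (fun d a => d.modify (pvCategory a.1) 0 (· + a.2)) d).getD c 0
    = l.foldl (fun s a => if pvCategory a.1 == c then s + a.2 else s) (d.getD c 0) := by
  intro l
  induction l with
  | nil => intro d; rfl
  | cons a l ih =>
    intro d
    simp only [List.foldl_cons, ih, PySem.Dict.getD_modify]
    by_cases h : pvCategory a.1 = c
    · simp [h]
    · simp [h, Ne.symm h]

-- ===== VERDICT (by name: the statement is the Claim_ definition above) =====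
theorem trimArrayCounts_spec : Claim_equal_trimArrayCounts := by
  intro counts _
  unfold Spec_trimArrayCounts
  simp only [trimArrayCounts, trimArrayCounts_alt]
  have hstep : ∀ (d : PySem.Dict String Int),
      counts.foldl (fun d array =>
        if PySem.Str.isIn "VNX" array.1 then d.modify "VNX" 0 (· + array.2)
        else if PySem.Str.isIn "SYMMETRIX" array.1 then d.modify "Symmetrix" 0 (· + array.2)
        else if PySem.Str.isIn "DATADOMAIN" array.1 then d.modify "Data Domain" 0 (· + array.2)
        else if PySem.Str.isIn "ISILON" array.1 then d.modify "Isilon" 0 (· + array.2)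
        else if PySem.Str.isIn "XTREMIO" array.1 then d.modify "XtremIO" 0 (· + array.2)
        else if PySem.Str.isIn "CONNECTRIX" array.1 then d.modify "Connectrix" 0 (· + array.2)
        else if PySem.Str.isIn "RECOVERPOINT" array.1 then d.modify "Recoverpoint" 0 (· + array.2)
        else if PySem.Str.isIn "AVAMAR" array.1 then d.modify "Avamar" 0 (· + array.2)
        else if PySem.Str.isIn "VPLEX" array.1 then d.modify "VPLEX" 0 (· + array.2)
        else if PySem.Str.isIn "CLARIION" array.1 then d.modify "Clariion" 0 (· + array.2)
        else if PySem.Str.isIn "CELERRA" array.1 then d.modify "Clariion" 0 (· + array.2)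
        else if PySem.Str.isIn "VIPR" array.1 then d.modify "ECS/ViPR" 0 (· + array.2)
        else if PySem.Str.isIn "SCALEIO" array.1 then d.modify "ScaleIO" 0 (· + array.2)
        else if PySem.Str.isIn "ECS" array.1 then d.modify "ECS/ViPR" 0 (· + array.2)
        else d.modify "Other" 0 (· + array.2)) d
      = counts.foldl (fun d a => d.modify (pvCategory a.1) 0 (· + a.2)) d := by
    intro d
    apply List.foldl_ext
    intro d a _
    exact pvStep_eq d a
  rw [hstep]
  have hnd : (PySem.Dict.ofList
      [("VNX", (0:Int)), ("Symmetrix", 0), ("XtremIO", 0), ("Clariion", 0), ("Isilon", 0),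
       ("Connectrix", 0), ("Recoverpoint", 0), ("Data Domain", 0), ("Avamar", 0),
       ("VPLEX", 0), ("ScaleIO", 0), ("ECS/ViPR", 0), ("Other", 0)]).keys.Nodup := by decide
  have hkeys0 : (PySem.Dict.ofList
      [("VNX", (0:Int)), ("Symmetrix", 0), ("XtremIO", 0), ("Clariion", 0), ("Isilon", 0),
       ("Connectrix", 0), ("Recoverpoint", 0), ("Data Domain", 0), ("Avamar", 0),
       ("VPLEX", 0), ("ScaleIO", 0), ("ECS/ViPR", 0), ("Other", 0)]).keys = pvOrder := by decide
  set d0 := PySem.Dict.ofList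
      [("VNX", (0:Int)), ("Symmetrix", 0), ("XtremIO", 0), ("Clariion", 0), ("Isilon", 0),
       ("Connectrix", 0), ("Recoverpoint", 0), ("Data Domain", 0), ("Avamar", 0),
       ("VPLEX", 0), ("ScaleIO", 0), ("ECS/ViPR", 0), ("Other", 0)] with hd0
  set F := counts.foldl (fun d a => d.modify (pvCategory a.1) 0 (· + a.2)) d0 with hF
  have hFnd : F.keys.Nodup := by
    rw [hF]
    exact PySem.Dict.nodup_keys_foldl_modify_key counts (fun a => pvCategory a.1) 0
      (fun d a => fun x => x + a.2) d0 hnd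
  have hFkeys : F.keys = pvOrder := by
    rw [hF, PySem.Dict.keys_foldl_modify_key, hkeys0,
      PySem.Set.update_eq_append_filter]
    have : (PySem.Set.ofList (counts.map (fun a => pvCategory a.1))).filter
        (fun y => !(PySem.Set.contains pvOrder y)) = [] := by
      rw [List.filter_eq_nil_iff]
      intro y hy
      have hy' : y ∈ counts.map (fun a => pvCategory a.1) := (PySem.Set.mem_ofList _ _).mp hy
      obtain ⟨a, _, rfl⟩ := List.mem_map.mp hy'
      simpa using pvCategory_mem_order a.1
    rw [this, List.append_nil]
  have hitems := PySem.Dict.items_eq_map_keys F hFnd 0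
  rw [hitems, hFkeys]
  apply List.map_congr_left
  intro k hk
  have hget0 : d0.getD k 0 = 0 := by
    have : ∀ k ∈ pvOrder, d0.getD k 0 = 0 := by decide
    exact this k hk
  rw [hF, pvGetD_fold, hget0, List.foldl_map]
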